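-- pv_equiv track=rewrite | github.com/ghadj/Cat-V1-Simple-Cell | v1_simple_cell/utils.py | get_interval_indexes
-- ===== SOURCE A (Python) =====
-- def get_index_bounds(indexes):
--     """Returns the bounds (first and last element) of consecutive numbers.
--
--     Example:
--     [1 , 3, 4, 5, 7, 8, 9, 10] -> [1, 3, 5, 7, 10]
--
--     Args:
--         indexes (list of int): integers in an ascending order.
--
--     Returns:
--         list of int: the bounds (first and last element) of consecutive numbers.
--     """
--
--     index_bounds = [indexes[0]]
--
--     for i, v in enumerate(indexes):
--         if i == len(indexes)-1:
--             index_bounds.append(v)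
--             break
--
--         if v+1 == indexes[i+1]:
--             continue
--         else:
--             index_bounds.append(v)
--             index_bounds.append(indexes[i+1])
--
--     return index_bounds
--
-- def get_interval_indexes(interval, indexes):
--     """Returns the given indexes, after removing <interval> elements from the
--     beginning and ending of each sequence of consecutive numbers.
--
--     Args:
--         interval (int): number of elements to be removed from beginning and
--             ending of each sequence of consecutive numbers.
--         indexes (list of int): integers in an ascending order.
--
--     Returns:
--         list of int: the given indexes, after removing <interval> elements from
--             the beginning and ending of each sequence of consecutive numbers.
--     """
--
--     if len(indexes) == 0:
--         return 0
--
--     index_bounds = get_index_bounds(indexes)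
--
--     interval_indexes = []
--
--     for i in range(0, len(index_bounds)-1, 2):
--         if index_bounds[i]+interval >= index_bounds[i+1]:
--             continue
--
--         interval_indexes.extend(range(index_bounds[i]+interval,
--                                       index_bounds[i+1]-interval+1))
--
--     return interval_indexes
-- ===== SOURCE B (Python) =====
-- def get_interval_indexes(interval, indexes):
--     if len(indexes) == 0:
--         return 0
--     out = []
--     start = indexes[0]
--     n = len(indexes)
--     for i in range(n):
--         v = indexes[i]
--         # close the current run at a break or at the end of the list
--         if i + 1 == n or v + 1 != indexes[i + 1]:
--             if start + interval < v:
--                 out.extend(range(start + interval, v - interval + 1))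
--             if i + 1 < n:
--                 start = indexes[i + 1]
--     return out
-- ===== Notes on version B (the rewrite author's own statement) =====
-- stated objective: simpler
-- what changed: B replaces A's two-phase scheme (build a flattened run-bounds list via get_index_bounds, then a stride-2 pairing loop over it) with one direct pass over the indexes that tracks the current run's start and emits each trimmed range inline when the run closes.
-- outside the precondition, e.g. on get_interval_indexes(0, []): A returns 0, B returns 0
import Mathlib
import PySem

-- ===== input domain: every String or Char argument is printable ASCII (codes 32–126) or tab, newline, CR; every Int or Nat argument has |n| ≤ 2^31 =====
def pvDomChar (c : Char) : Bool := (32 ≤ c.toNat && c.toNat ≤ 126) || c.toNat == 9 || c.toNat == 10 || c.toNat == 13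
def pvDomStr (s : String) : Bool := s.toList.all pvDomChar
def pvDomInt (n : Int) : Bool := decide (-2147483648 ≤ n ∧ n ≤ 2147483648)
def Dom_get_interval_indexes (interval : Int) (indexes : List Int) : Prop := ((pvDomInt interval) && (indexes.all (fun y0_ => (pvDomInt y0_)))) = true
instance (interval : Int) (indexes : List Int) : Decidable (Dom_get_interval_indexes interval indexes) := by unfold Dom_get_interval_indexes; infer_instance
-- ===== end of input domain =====

-- B fuses A's two phases (bounds list + stride-2 pairing) into one inline run-detecting pass (objective: simpler).
-- On the empty list both Pythons return the int 0, not a list; Pre_ excludes that input.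

-- ===== PORT A =====
-- the enumerate loop of get_index_bounds: lookahead on adjacent pairs; the `break`
-- fires exactly at the last element, which is the [v] case here
def pvBoundsAux : List Int → List Int
  | [] => []
  | [v] => [v]
  | v :: w :: rest =>
      if v + 1 == w then pvBoundsAux (w :: rest)
      else v :: w :: pvBoundsAux (w :: rest)

def get_index_bounds (indexes : List Int) : List Int :=
  match indexes with
  | [] => []  -- Python raises IndexError on indexes[0]; unreachable under Pre_
  | x :: _ => x :: pvBoundsAux indexes

-- the stride-2 loop `for i in range(0, len(index_bounds)-1, 2)` consumes the bounds pairwise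
def pvPairsLoop (interval : Int) : List Int → List Int
  | a :: b :: rest =>
      (if a + interval ≥ b then []
       else PySem.List.pyRange (a + interval) (b - interval + 1) 1) ++ pvPairsLoop interval rest
  | _ => []

def get_interval_indexes (interval : Int) (indexes : List Int) : List Int :=
  if indexes.length == 0 then []  -- Python returns the int 0 here; excluded by Pre_
  else pvPairsLoop interval (get_index_bounds indexes)

-- ===== PORT B =====
-- B's single pass: `start` is the current run's first element; a run closes at a
-- break (v+1 ≠ next) or at the last element, and its trimmed range is emitted inline
def pvRunsLoop (interval : Int) (start : Int) : List Int → List Int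
  | [] => []
  | [v] => if start + interval < v
           then PySem.List.pyRange (start + interval) (v - interval + 1) 1
           else []
  | v :: w :: rest =>
      if v + 1 != w then
        (if start + interval < v
         then PySem.List.pyRange (start + interval) (v - interval + 1) 1
         else []) ++ pvRunsLoop interval w (w :: rest)
      else pvRunsLoop interval start (w :: rest)

def get_interval_indexes_alt (interval : Int) (indexes : List Int) : List Int :=
  match indexes with
  | [] => []  -- Python returns the int 0 here; excluded by Pre_
  | x :: _ => pvRunsLoop interval x indexes

-- ===== PRECONDITION & SPEC =====
-- Pre_ excludes the empty list, on which both Pythons return the int 0 — not a value of the declared list type.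
def Pre_get_interval_indexes (interval : Int) (indexes : List Int) : Prop := indexes ≠ []
instance (interval : Int) (indexes : List Int) : Decidable (Pre_get_interval_indexes interval indexes) := by unfold Pre_get_interval_indexes; infer_instance
def pvWitness_get_interval_indexes : Int × List Int := (1, [1, 2, 3, 4, 5, 8, 10, 11, 12])

def Spec_get_interval_indexes (interval : Int) (indexes : List Int) (out : List Int) : Prop := out = get_interval_indexes_alt interval indexes
instance (interval : Int) (indexes : List Int) (out : List Int) : Decidable (Spec_get_interval_indexes interval indexes out) := by unfold Spec_get_interval_indexes; infer_instance

-- ===== CLAIM (what is proved, stated in full; the proofs are below) =====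
def Claim_equal_get_interval_indexes : Prop := ∀ (interval : Int) (indexes : List Int), Dom_get_interval_indexes interval indexes → Pre_get_interval_indexes interval indexes → Spec_get_interval_indexes interval indexes (get_interval_indexes interval indexes)

-- ===== LEMMAS AND PROOFS =====

-- the pairing loop over `start` followed by the bounds of xs is B's run loop
theorem pvPairs_eq_runs (interval : Int) :
    ∀ (xs : List Int) (s : Int), xs ≠ [] →
      pvPairsLoop interval (s :: pvBoundsAux xs) = pvRunsLoop interval s xs := by
  intro xs
  induction xs with
  | nil => intro s h; exact absurd rfl h
  | cons v rest ih =>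
    intro s _
    cases rest with
    | nil =>
      simp only [pvBoundsAux, pvPairsLoop, pvRunsLoop, List.append_nil]
      by_cases h : s + interval < v
      · rw [if_neg (not_le.mpr h), if_pos h]
      · rw [if_pos (not_lt.mp h), if_neg h]
    | cons w rest' =>
      by_cases hc : v + 1 = w
      · simp [pvBoundsAux, pvRunsLoop, hc]
        exact ih s (by simp)
      · have hb : pvBoundsAux (v :: w :: rest') = v :: w :: pvBoundsAux (w :: rest') := by
          simp [pvBoundsAux, hc]
        have hr : pvRunsLoop interval s (v :: w :: rest') =
            (if s + interval < v
             then PySem.List.pyRange (s + interval) (v - interval + 1) 1 else [])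
              ++ pvRunsLoop interval w (w :: rest') := by
          simp [pvRunsLoop, hc]
        rw [hb, hr]
        simp only [pvPairsLoop]
        rw [ih w (by simp)]
        by_cases h : s + interval < v
        · rw [if_neg (not_le.mpr h), if_pos h]
        · rw [if_pos (not_lt.mp h), if_neg h]

-- ===== VERDICT (by name: the statement is the Claim_ definition above) =====
theorem get_interval_indexes_spec : Claim_equal_get_interval_indexes := by
  intro interval indexes _ hpre
  unfold Spec_get_interval_indexes get_interval_indexes get_interval_indexes_alt get_index_bounds
  cases indexes with
  | nil => exact absurd rfl hpre
  | cons x rest =>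
    rw [if_neg (by simp)]
    exact pvPairs_eq_runs interval (x :: rest) x (by simp)
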